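-- pv_equiv track=rewrite | github.com/adamblackman/splicer | splicer-webcontainer/src/utils/security.py | validate_access_token
-- ===== SOURCE A (Python) =====
-- TOKEN_PREFIX = "spl_"  # Prefix for easy identification
--
-- def validate_access_token(token: str | None) -> bool:
--     """Validate access token format.
--
--     This only validates the format, not whether the token exists in the database.
--     Database validation should be done separately.
--
--     Args:
--         token: Token to validate
--
--     Returns:
--         True if token format is valid
--     """
--     if not token:
--         return False
--
--     if not token.startswith(TOKEN_PREFIX):
--         return False
--
--     # Check minimum length (prefix + base64 encoded 32 bytes)
--     if len(token) < len(TOKEN_PREFIX) + 20: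
--         return False
--
--     # Check for valid URL-safe base64 characters after prefix
--     token_body = token[len(TOKEN_PREFIX):]
--     valid_chars = set("ABCDEFGHIJKLMNOPQRSTUVWXYZabcdefghijklmnopqrstuvwxyz0123456789-_")
--     if not all(c in valid_chars for c in token_body):
--         return False
--
--     return True
-- ===== SOURCE B (Python) =====
-- def validate_access_token(token):
--     # Table-driven finite automaton over the whole token in one fold: states
--     # 0-3 match the prefix character-by-character against the prefix string indexed by the state,
--     # states 4-24 count valid body characters (saturating at 24), -1 is the
--     # absorbing dead state; accept iff the final state is 24.
--     if token is None:
--         return False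
--     state = 0
--     for c in token:
--         if state < 0:
--             break
--         if state < 4:
--             state = state + 1 if c == "spl_"[state] else -1
--         elif ("A" <= c <= "Z") or ("a" <= c <= "z") or ("0" <= c <= "9") or c == "-" or c == "_":
--             state = min(state + 1, 24)
--         else:
--             state = -1
--     return state == 24
-- ===== Notes on version B (the rewrite author's own statement) =====
-- stated objective: alternative
-- what changed: Replaces A's staged checks (startswith, length test, all-in-set scan of the suffix) with a single table-driven finite automaton folded once over the whole token: states 0-3 match the prefix char-by-char by indexing the prefix string with the state, states 4-24 saturate while counting valid body chars, -1 is an absorbing dead state, and the token is accepted iff the final state is 24.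
import Mathlib
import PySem

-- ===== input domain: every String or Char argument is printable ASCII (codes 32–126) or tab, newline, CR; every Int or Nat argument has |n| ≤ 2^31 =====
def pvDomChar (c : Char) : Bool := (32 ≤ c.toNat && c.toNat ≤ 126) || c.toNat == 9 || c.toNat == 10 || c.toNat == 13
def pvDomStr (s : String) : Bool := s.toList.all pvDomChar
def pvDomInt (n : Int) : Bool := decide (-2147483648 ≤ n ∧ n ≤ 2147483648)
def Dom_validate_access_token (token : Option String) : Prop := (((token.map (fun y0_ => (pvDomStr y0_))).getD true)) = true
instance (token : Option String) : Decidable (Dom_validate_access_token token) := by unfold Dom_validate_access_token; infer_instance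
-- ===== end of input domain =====

-- B replaces A's staged checks (startswith / length / all-in-set scan) by one table-driven
-- finite-automaton fold over the whole token; same O(n) cost, no speed claim.

-- ===== PORT A =====
-- valid_chars = set("ABC…-_")
def validChars : PySem.Set Char :=
  PySem.Set.ofList "ABCDEFGHIJKLMNOPQRSTUVWXYZabcdefghijklmnopqrstuvwxyz0123456789-_".toList

def validate_access_token (token : Option String) : Bool :=
  match token with
  | none => false                                   -- 'if not token' (None is falsy)
  | some t =>
    if t.toList = [] then false                     -- 'if not token' ('' is falsy)
    else if !(PySem.Str.startswith t "spl_") then false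
    else if PySem.Str.len t < PySem.Str.len "spl_" + 20 then false
    else
      let token_body := PySem.Str.slice t (some (PySem.Str.len "spl_")) none
      if !(token_body.toList.all (fun c => PySem.Set.contains validChars c)) then false
      else true

-- ===== PORT B =====
-- one automaton step of Source B's loop body (the 'if state < 0: break' is the first branch:
-- the dead state absorbs, so breaking and keeping folding compute the same final state)
def dfaStep (state : Int) (c : Char) : Int :=
  if state < 0 then state
  else if state < 4 then
    -- Python: c equals the prefix string indexed at state (state is 0..3 here, always in range)
    if PySem.Str.pyGet? "spl_" state = some c then state + 1 else -1
  else if (('A' ≤ c && c ≤ 'Z') || ('a' ≤ c && c ≤ 'z') || ('0' ≤ c && c ≤ '9')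
           || c == '-' || c == '_') then
    min (state + 1) 24
  else -1

def validate_access_token_alt (token : Option String) : Bool :=
  match token with
  | none => false                                   -- 'if token is None'
  | some t => (t.toList.foldl dfaStep 0) == 24      -- the for-loop over token, then 'state == 24'

-- ===== PRECONDITION & SPEC =====
def Spec_validate_access_token (token : Option String) (out : Bool) : Prop := out = validate_access_token_alt token
instance (token : Option String) (out : Bool) : Decidable (Spec_validate_access_token token out) := by unfold Spec_validate_access_token; infer_instance

-- ===== CLAIM (what is proved, stated in full; the proofs are below) =====
def Claim_equal_validate_access_token : Prop := ∀ (token : Option String), Dom_validate_access_token token → Spec_validate_access_token token (validate_access_token token)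

-- ===== LEMMAS AND PROOFS =====
set_option maxRecDepth 8192

-- B's body-character range test, named for the proofs
def charOkB (c : Char) : Bool :=
  (('A' ≤ c && c ≤ 'Z') || ('a' ≤ c && c ≤ 'z') || ('0' ≤ c && c ≤ '9') || c == '-' || c == '_')

-- A's set membership agrees with B's range test on every character
theorem contains_validChars_eq_charOkB (c : Char) :
    PySem.Set.contains validChars c = charOkB c := by
  by_cases h : charOkB c = true
  · rw [h, PySem.Set.contains_iff]
    simp only [charOkB, Bool.or_eq_true, Bool.and_eq_true, decide_eq_true_eq, beq_iff_eq] at h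
    rcases h with (((⟨h1, h2⟩ | ⟨h1, h2⟩) | ⟨h1, h2⟩) | h) | h
    · have n1 : 65 ≤ c.toNat := Char.le_def.mp h1
      have n2 : c.toNat ≤ 90 := Char.le_def.mp h2
      have hc : c = Char.ofNat c.toNat := (Char.ofNat_toNat c).symm
      rw [hc]; set n := c.toNat
      interval_cases n <;> decide
    · have n1 : 97 ≤ c.toNat := Char.le_def.mp h1
      have n2 : c.toNat ≤ 122 := Char.le_def.mp h2
      have hc : c = Char.ofNat c.toNat := (Char.ofNat_toNat c).symm
      rw [hc]; set n := c.toNat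
      interval_cases n <;> decide
    · have n1 : 48 ≤ c.toNat := Char.le_def.mp h1
      have n2 : c.toNat ≤ 57 := Char.le_def.mp h2
      have hc : c = Char.ofNat c.toNat := (Char.ofNat_toNat c).symm
      rw [hc]; set n := c.toNat
      interval_cases n <;> decide
    · subst h; decide
    · subst h; decide
  · rw [Bool.not_eq_true] at h; rw [h]
    by_contra hcon
    rw [Bool.not_eq_false, PySem.Set.contains_iff] at hcon
    have hm : c ∈ "ABCDEFGHIJKLMNOPQRSTUVWXYZabcdefghijklmnopqrstuvwxyz0123456789-_".toList :=
      (PySem.List.mem_dedup _ c).mp hcon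
    have hall : ("ABCDEFGHIJKLMNOPQRSTUVWXYZabcdefghijklmnopqrstuvwxyz0123456789-_".toList.all charOkB) = true := by decide
    exact absurd (List.all_eq_true.mp hall c hm) (by simp [h])

-- the dead state absorbs
theorem foldl_dead (l : List Char) (s : Int) (hs : s < 0) : l.foldl dfaStep s = s := by
  induction l with
  | nil => rfl
  | cons c r ih => simp only [List.foldl_cons, dfaStep, if_pos hs]; exact ih

-- each step raises the state by at most 1
theorem foldl_le (l : List Char) (s : Int) : l.foldl dfaStep s ≤ s + l.length := by
  induction l generalizing s with
  | nil => simp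
  | cons c r ih =>
    have hstep : dfaStep s c ≤ s + 1 := by
      unfold dfaStep
      split_ifs <;> omega
    calc (c :: r).foldl dfaStep s = r.foldl dfaStep (dfaStep s c) := rfl
      _ ≤ dfaStep s c + r.length := ih _
      _ ≤ s + (c :: r).length := by simp; omega

-- in the body phase (4 ≤ s ≤ 24) the fold is: all chars valid → saturating count, else dead
theorem foldl_body (l : List Char) (s : Int) (h4 : 4 ≤ s) (h24 : s ≤ 24) :
    l.foldl dfaStep s = if l.all charOkB then min (s + l.length) 24 else -1 := by
  induction l generalizing s with
  | nil => simp; omega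
  | cons c r ih =>
    have hstep : dfaStep s c = if charOkB c then min (s + 1) 24 else -1 := by
      unfold dfaStep charOkB
      rw [if_neg (by omega), if_neg (by omega)]
    rw [List.foldl_cons, hstep]
    by_cases hc : charOkB c
    · rw [if_pos hc, ih _ (by omega) (by omega)]
      simp only [List.all_cons, hc, Bool.true_and, List.length_cons]
      split_ifs <;> [skip; rfl]
      omega
    · rw [if_neg hc, foldl_dead _ _ (by omega)]
      simp [hc]

-- the full automaton run on a token with at least 4 characters
theorem foldl_full (a b c d : Char) (rest : List Char) (h20 : 20 ≤ rest.length) :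
    (a :: b :: c :: d :: rest).foldl dfaStep 0 =
      if a = 's' ∧ b = 'p' ∧ c = 'l' ∧ d = '_' then
        (if rest.all charOkB then 24 else -1)
      else -1 := by
  simp only [List.foldl_cons]
  have hmin : min ((4 : Int) + rest.length) 24 = 24 := by
    have : (20 : Int) ≤ rest.length := by exact_mod_cast h20
    omega
  have hdead : ∀ e : Char, dfaStep (-1) e = -1 := by
    intro e; simp [dfaStep]
  have hdrest := foldl_dead rest (-1) (by norm_num)
  by_cases ha : a = 's'
  · subst ha
    have h0 : dfaStep 0 's' = 1 := by decide
    rw [h0]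
    by_cases hb : b = 'p'
    · subst hb
      have h1 : dfaStep 1 'p' = 2 := by decide
      rw [h1]
      by_cases hc : c = 'l'
      · subst hc
        have h2 : dfaStep 2 'l' = 3 := by decide
        rw [h2]
        by_cases hd : d = '_'
        · subst hd
          have h3 : dfaStep 3 '_' = 4 := by decide
          rw [h3, foldl_body rest 4 (by omega) (by omega)]
          simp [hmin]
        · have h3 : dfaStep 3 d = -1 := by
            unfold dfaStep
            rw [if_neg (by omega), if_pos (by omega), if_neg]
            intro hcon
            exact hd (by simpa using (Option.some_inj.mp ((by decide : PySem.Str.pyGet? "spl_" 3 = some '_') ▸ hcon)).symm)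
          rw [h3]
          simp [hdrest, hd]
      · have h2 : dfaStep 2 c = -1 := by
          unfold dfaStep
          rw [if_neg (by omega), if_pos (by omega), if_neg]
          intro hcon
          exact hc (by simpa using (Option.some_inj.mp ((by decide : PySem.Str.pyGet? "spl_" 2 = some 'l') ▸ hcon)).symm)
        rw [h2]
        simp [hdead, hdrest, hc]
    · have h1 : dfaStep 1 b = -1 := by
        unfold dfaStep
        rw [if_neg (by omega), if_pos (by omega), if_neg]
        intro hcon
        exact hb (by simpa using (Option.some_inj.mp ((by decide : PySem.Str.pyGet? "spl_" 1 = some 'p') ▸ hcon)).symm)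
      rw [h1]
      simp [hdead, hdrest, hb]
  · have h0 : dfaStep 0 a = -1 := by
      unfold dfaStep
      rw [if_neg (by omega), if_pos (by omega), if_neg]
      intro hcon
      exact ha (by simpa using (Option.some_inj.mp ((by decide : PySem.Str.pyGet? "spl_" 0 = some 's') ▸ hcon)).symm)
    rw [h0]
    simp [hdead, hdrest, ha]

theorem validate_access_token_eq (token : Option String) :
    validate_access_token token = validate_access_token_alt token := by
  cases token with
  | none => rfl
  | some t =>
    simp only [validate_access_token, validate_access_token_alt]
    have hlen : PySem.Str.len t = (t.toList.length : Int) := PySem.Str.len_eq t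
    have hpre : PySem.Str.len "spl_" = (4 : Int) := by decide
    by_cases hshort : t.toList.length < 24
    · -- short tokens: both sides are false
      have hB : (t.toList.foldl dfaStep 0 == 24) = false := by
        have hle := foldl_le t.toList 0
        have : (t.toList.length : Int) < 24 := by exact_mod_cast hshort
        simp only [beq_eq_false_iff_ne, ne_eq]
        omega
      rw [hB]
      split_ifs with h1 h2 h3 h4 <;> try rfl
      exfalso
      rw [hlen, hpre] at h3
      omega
    · -- long tokens: 24 ≤ length, so the list has shape a::b::c::d::rest with 20 ≤ |rest|
      have h24 : 24 ≤ t.toList.length := by omega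
      obtain ⟨a, b, c, d, rest, hL, h20⟩ :
          ∃ a b c d rest, t.toList = a :: b :: c :: d :: rest ∧ 20 ≤ rest.length := by
        rcases hL : t.toList with _ | ⟨a, _ | ⟨b, _ | ⟨c, _ | ⟨d, rest⟩⟩⟩⟩ <;>
          [skip; skip; skip; skip; exact ⟨a, b, c, d, rest, rfl, by
            rw [hL] at h24; simp at h24; omega⟩] <;>
          rw [hL] at h24 <;> simp at h24
      have hslice : (PySem.Str.slice t (some (PySem.Str.len "spl_")) none).toList
          = t.toList.drop 4 := by
        rw [hpre]; simp [PySem.Str.slice, pysem]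
      have hnil : ¬ (t.toList = []) := by rw [hL]; simp
      rw [hL, foldl_full a b c d rest h20]
      rw [if_neg (hL ▸ hnil)]
      by_cases hp : a = 's' ∧ b = 'p' ∧ c = 'l' ∧ d = '_'
      · obtain ⟨ha, hb, hc, hd⟩ := hp
        subst ha; subst hb; subst hc; subst hd
        have hsw : PySem.Str.startswith t "spl_" = true := by
          rw [PySem.Str.startswith_eq, PySem.Chars.startswith_iff, hL]
          exact ⟨rest, rfl⟩
        rw [hsw, if_neg (by simp), if_neg (by rw [hlen, hpre, hL]; simp; omega),
            hslice, hL]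
        simp only [List.drop_succ_cons, List.drop_zero, contains_validChars_eq_charOkB]
        cases rest.all charOkB
        · simp
        · simp
      · have hsw : PySem.Str.startswith t "spl_" = false := by
          rw [PySem.Str.startswith_eq]
          rw [Bool.eq_false_iff]
          intro hcon
          have hpfx := (PySem.Chars.startswith_iff _ _).mp hcon
          rw [hL] at hpfx
          have hspl : "spl_".toList = ['s', 'p', 'l', '_'] := by decide
          rw [hspl] at hpfx
          simp only [List.cons_prefix_cons] at hpfx
          exact hp ⟨hpfx.1.symm, hpfx.2.1.symm, hpfx.2.2.1.symm, hpfx.2.2.2.1.symm⟩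
        rw [hsw, if_pos (by simp), if_neg hp]
        decide

-- ===== VERDICT (by name: the statement is the Claim_ definition above) =====
theorem validate_access_token_spec : Claim_equal_validate_access_token := by
  intro token _
  unfold Spec_validate_access_token
  exact validate_access_token_eq token
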